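-- pv_equiv track=rewrite | github.com/mitchellfyi/launchonomy | launchonomy/agents/workflow/agent_trainer.py | _improve_capabilities
-- ===== SOURCE A (Python) =====
-- from typing import Dict, Any, Optional, List
--
-- def _improve_capabilities(current_capabilities: List[str], analysis: Dict[str, Any]) -> List[str]:
--     """Improve capabilities list based on analysis."""
--     improved_capabilities = current_capabilities.copy()
--
--     # Add error handling capability if missing
--     if "error_handling" not in improved_capabilities:
--         error_handling_needed = any(
--             "error" in area.get("area", "").lower()
--             for area in analysis.get("improvement_areas", [])
--         )
--         if error_handling_needed:
--             improved_capabilities.append("error_handling")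
--
--     # Add validation capability if missing
--     if "validation" not in improved_capabilities:
--         validation_needed = any(
--             "validation" in area.get("area", "").lower() or "schema" in area.get("area", "").lower()
--             for area in analysis.get("improvement_areas", [])
--         )
--         if validation_needed:
--             improved_capabilities.append("validation")
--
--     return improved_capabilities
-- ===== SOURCE B (Python) =====
-- def _improve_capabilities(current_capabilities, analysis):
--     """Single pass over improvement areas, setting flags, then two conditional appends."""
--     error_seen = False
--     validation_seen = False
--     for area in analysis.get("improvement_areas", []):
--         a = area.get("area", "").lower()
--         if "error" in a:
--             error_seen = True
--         if "validation" in a or "schema" in a: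
--             validation_seen = True
--     improved = current_capabilities.copy()
--     if error_seen and "error_handling" not in improved:
--         improved.append("error_handling")
--     if validation_seen and "validation" not in improved:
--         improved.append("validation")
--     return improved
-- ===== Notes on version B (the rewrite author's own statement) =====
-- stated objective: alternative
-- what changed: Replaces the two separate any() generator scans (each re-reading and re-lowercasing every area dict) with a single loop that lowercases each area once and accumulates two boolean flags, followed by two conditional appends.
import Mathlib
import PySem

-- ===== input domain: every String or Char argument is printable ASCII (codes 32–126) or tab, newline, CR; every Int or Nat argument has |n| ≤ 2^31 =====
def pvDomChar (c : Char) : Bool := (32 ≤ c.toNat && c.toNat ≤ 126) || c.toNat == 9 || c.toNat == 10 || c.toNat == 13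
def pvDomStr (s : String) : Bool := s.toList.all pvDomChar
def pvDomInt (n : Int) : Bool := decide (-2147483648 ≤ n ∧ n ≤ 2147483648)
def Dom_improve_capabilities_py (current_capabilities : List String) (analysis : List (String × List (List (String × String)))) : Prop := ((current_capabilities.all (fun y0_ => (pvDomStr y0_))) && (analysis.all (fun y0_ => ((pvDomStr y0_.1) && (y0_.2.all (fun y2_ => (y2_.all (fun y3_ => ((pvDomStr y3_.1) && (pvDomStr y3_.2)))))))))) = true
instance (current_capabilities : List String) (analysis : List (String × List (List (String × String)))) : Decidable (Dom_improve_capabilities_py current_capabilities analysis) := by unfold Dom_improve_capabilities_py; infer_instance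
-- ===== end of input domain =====

-- B replaces A's two separate any() scans (each re-lowercasing every area) with one
-- flag-accumulating pass followed by two conditional appends (objective: alternative).

-- ===== PORT A =====
-- A: copy, then per capability a membership guard around an any() scan over the areas.
def improve_capabilities_py (current_capabilities : List String) (analysis : List (String × List (List (String × String)))) : List String :=
  let improved := current_capabilities
  let improved :=
    if improved.contains "error_handling" then improved
    else
      let error_handling_needed :=
        ((PySem.Dict.mk analysis).getD "improvement_areas" []).any
          (fun area => PySem.Str.isIn "error" (PySem.Str.lower ((PySem.Dict.mk area).getD "area" "")))
      if error_handling_needed then improved ++ ["error_handling"] else improved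
  let improved :=
    if improved.contains "validation" then improved
    else
      let validation_needed :=
        ((PySem.Dict.mk analysis).getD "improvement_areas" []).any
          (fun area => PySem.Str.isIn "validation" (PySem.Str.lower ((PySem.Dict.mk area).getD "area" ""))
                    || PySem.Str.isIn "schema" (PySem.Str.lower ((PySem.Dict.mk area).getD "area" "")))
      if validation_needed then improved ++ ["validation"] else improved
  improved

-- ===== PORT B =====
-- B: one foldl over the areas accumulating two flags, then two conditional appends.
def improve_capabilities_py_alt (current_capabilities : List String) (analysis : List (String × List (List (String × String)))) : List String :=
  let flags :=
    ((PySem.Dict.mk analysis).getD "improvement_areas" []).foldl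
      (fun (fl : Bool × Bool) area =>
        let a := PySem.Str.lower ((PySem.Dict.mk area).getD "area" "")
        (fl.1 || PySem.Str.isIn "error" a,
         fl.2 || (PySem.Str.isIn "validation" a || PySem.Str.isIn "schema" a)))
      (false, false)
  let improved := current_capabilities
  let improved :=
    if flags.1 && !(improved.contains "error_handling") then improved ++ ["error_handling"] else improved
  let improved :=
    if flags.2 && !(improved.contains "validation") then improved ++ ["validation"] else improved
  improved

-- ===== PRECONDITION & SPEC =====
def Spec_improve_capabilities_py (current_capabilities : List String) (analysis : List (String × List (List (String × String)))) (out : List String) : Prop := out = improve_capabilities_py_alt current_capabilities analysis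
instance (current_capabilities : List String) (analysis : List (String × List (List (String × String)))) (out : List String) : Decidable (Spec_improve_capabilities_py current_capabilities analysis out) := by unfold Spec_improve_capabilities_py; infer_instance

-- ===== CLAIM (what is proved, stated in full; the proofs are below) =====
def Claim_equal_improve_capabilities_py : Prop := ∀ (current_capabilities : List String) (analysis : List (String × List (List (String × String)))), Dom_improve_capabilities_py current_capabilities analysis → Spec_improve_capabilities_py current_capabilities analysis (improve_capabilities_py current_capabilities analysis)

-- ===== LEMMAS AND PROOFS =====

-- B's flag fold computes exactly the two any() scans of A.
theorem flags_foldl_eq {α : Type} (l : List α) (pe pv : α → Bool) (e v : Bool) :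
    l.foldl (fun (fl : Bool × Bool) a => (fl.1 || pe a, fl.2 || pv a)) (e, v)
      = (e || l.any pe, v || l.any pv) := by
  induction l generalizing e v with
  | nil => simp
  | cons x xs ih => simp [ih, Bool.or_assoc]

-- ===== VERDICT (by name: the statement is the Claim_ definition above) =====
theorem improve_capabilities_py_spec : Claim_equal_improve_capabilities_py := by
  intro cc analysis _
  unfold Spec_improve_capabilities_py improve_capabilities_py improve_capabilities_py_alt
  simp only []
  rw [flags_foldl_eq]
  simp only [Bool.false_or]
  set anyE := ((PySem.Dict.mk analysis).getD "improvement_areas" []).any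
      (fun area => PySem.Str.isIn "error" (PySem.Str.lower ((PySem.Dict.mk area).getD "area" ""))) with hE
  set anyV := ((PySem.Dict.mk analysis).getD "improvement_areas" []).any
      (fun area => PySem.Str.isIn "validation" (PySem.Str.lower ((PySem.Dict.mk area).getD "area" ""))
                || PySem.Str.isIn "schema" (PySem.Str.lower ((PySem.Dict.mk area).getD "area" ""))) with hV
  cases anyE <;> cases anyV <;> cases hce : cc.contains "error_handling" <;>
    cases hcv : cc.contains "validation" <;>
    simp
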